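-- pv_equiv track=rewrite | github.com/Dr-Infernal/Thoth | ui/task_dialog.py | _parse_condition_expr
-- ===== SOURCE A (Python) =====
-- def _parse_condition_expr(expr: str):
--     """Parse a simple condition into (operator, value/extra). Returns (None, '') for complex."""
--     if not expr:
--         return (None, "")
--     # json:<path>:<sub_op>[:<value>]
--     if expr.startswith("json:"):
--         return ("json:", expr[len("json:"):])
--     # llm:<question>
--     if expr.startswith("llm:"):
--         return ("llm:", expr[len("llm:"):])
--     for op in ("not_contains:", "contains:", "not_empty", "empty",
--                "equals:", "matches:", "length_gt:", "length_lt:",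
--                "gte:", "lte:", "gt:", "lt:", "true", "false"):
--         if expr == op:  # no-value ops
--             return (op, "")
--         if expr.startswith(op) and op.endswith(":"):
--             return (op, expr[len(op):])
--     return (None, "")
-- ===== SOURCE B (Python) =====
-- _COLON_OPS = {"json:", "llm:", "not_contains:", "contains:", "equals:",
--               "matches:", "length_gt:", "length_lt:", "gte:", "lte:", "gt:", "lt:"}
-- _BARE_OPS = {"not_empty", "empty", "true", "false"}
--
--
-- def _parse_condition_expr(expr: str):
--     """Parse a simple condition into (operator, value/extra). Returns (None, '') for complex."""
--     if not expr:
--         return (None, "")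
--     i = expr.find(":")
--     if i >= 0:
--         prefix = expr[:i + 1]
--         if prefix in _COLON_OPS:
--             return (prefix, expr[i + 1:])
--         return (None, "")
--     if expr in _BARE_OPS:
--         return (expr, "")
--     return (None, "")
-- ===== Notes on version B (the rewrite author's own statement) =====
-- stated objective: simpler
-- what changed: A's ordered 14-way per-operator equals/startswith scan is replaced by one split at the first colon plus a set-membership lookup of the colon-prefix (or of the whole string among the four no-value operators).
import Mathlib
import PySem

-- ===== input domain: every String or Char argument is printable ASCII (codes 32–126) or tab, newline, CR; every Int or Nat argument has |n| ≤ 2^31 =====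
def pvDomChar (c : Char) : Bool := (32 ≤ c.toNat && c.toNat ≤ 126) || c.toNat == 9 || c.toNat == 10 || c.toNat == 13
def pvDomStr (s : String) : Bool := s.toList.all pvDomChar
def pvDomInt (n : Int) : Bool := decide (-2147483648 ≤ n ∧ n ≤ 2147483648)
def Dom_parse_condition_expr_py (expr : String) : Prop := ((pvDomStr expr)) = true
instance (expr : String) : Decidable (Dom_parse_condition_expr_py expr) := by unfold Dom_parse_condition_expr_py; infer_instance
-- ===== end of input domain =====

-- B replaces A's ordered per-operator equals/startswith scan by one split at the first colon
-- plus a membership lookup of the prefix (objective: simpler; exact same return values).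

-- ===== PORT A =====
-- the tuple of operators A's loop scans, in A's order
def pvAOps : List (List Char) :=
  ["not_contains:".toList, "contains:".toList, "not_empty".toList, "empty".toList,
   "equals:".toList, "matches:".toList, "length_gt:".toList, "length_lt:".toList,
   "gte:".toList, "lte:".toList, "gt:".toList, "lt:".toList, "true".toList, "false".toList]

-- the 'for op in (...)' loop of A
def pvALoop (l : List Char) : List (List Char) → Option String × String
  | [] => (none, "")
  | op :: ops =>
    if l = op then (some (String.ofList op), "")
    else if PySem.Chars.startswith l op && PySem.Chars.endswith op [':'] then
      (some (String.ofList op), String.ofList (PySem.Chars.slice l (some (op.length : Int)) none))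
    else pvALoop l ops

def parse_condition_expr_py (expr : String) : Option String × String :=
  if expr.toList = [] then (none, "")
  else if PySem.Chars.startswith expr.toList "json:".toList then
    (some "json:", String.ofList (PySem.Chars.slice expr.toList (some (("json:".toList.length : Int))) none))
  else if PySem.Chars.startswith expr.toList "llm:".toList then
    (some "llm:", String.ofList (PySem.Chars.slice expr.toList (some (("llm:".toList.length : Int))) none))
  else pvALoop expr.toList pvAOps

-- ===== PORT B =====
-- the set of operators that take a value after the colon (Source B's _COLON_OPS)
def pvColonOps : List (List Char) :=
  ["json:".toList, "llm:".toList, "not_contains:".toList, "contains:".toList,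
   "equals:".toList, "matches:".toList, "length_gt:".toList, "length_lt:".toList,
   "gte:".toList, "lte:".toList, "gt:".toList, "lt:".toList]

-- the no-value operators (Source B's _BARE_OPS)
def pvBareOps : List (List Char) :=
  ["not_empty".toList, "empty".toList, "true".toList, "false".toList]

def parse_condition_expr_py_alt (expr : String) : Option String × String :=
  if expr.toList = [] then (none, "")
  else
    let i := PySem.Chars.find expr.toList [':']
    if 0 ≤ i then
      let pre := PySem.Chars.slice expr.toList none (some (i + 1))
      if pvColonOps.contains pre then
        (some (String.ofList pre), String.ofList (PySem.Chars.slice expr.toList (some (i + 1)) none))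
      else (none, "")
    else if pvBareOps.contains expr.toList then (some (String.ofList expr.toList), "")
    else (none, "")

-- ===== PRECONDITION & SPEC =====
def Spec_parse_condition_expr_py (expr : String) (out : Option String × String) : Prop := out = parse_condition_expr_py_alt expr
instance (expr : String) (out : Option String × String) : Decidable (Spec_parse_condition_expr_py expr out) := by unfold Spec_parse_condition_expr_py; infer_instance

-- ===== CLAIM (what is proved, stated in full; the proofs are below) =====
def Claim_equal_parse_condition_expr_py : Prop := ∀ (expr : String), Dom_parse_condition_expr_py expr → Spec_parse_condition_expr_py expr (parse_condition_expr_py expr)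

-- ===== LEMMAS AND PROOFS =====

-- first-colon decomposition of a list that contains a colon
theorem pv_split (l : List Char) (h : ':' ∈ l) : ∃ t r, l = t ++ ':' :: r ∧ ':' ∉ t := by
  induction l with
  | nil => cases h
  | cons c l ih =>
    by_cases hc : c = ':'
    · exact ⟨[], l, by simp [hc], by simp⟩
    · rcases List.mem_cons.mp h with h1 | h1
      · exact absurd h1.symm hc
      · rcases ih h1 with ⟨t, r, rfl, ht⟩
        exact ⟨c :: t, r, rfl, by
          simp only [List.mem_cons, not_or]
          exact ⟨fun h => hc h.symm, ht⟩⟩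

-- two first-colon decompositions of the same list have the same head part
theorem pv_core (a : List Char) : ∀ (t s r : List Char), ':' ∉ t → ':' ∉ a →
    a ++ ':' :: s = t ++ ':' :: r → t = a := by
  induction a with
  | nil =>
    intro t s r ht _ h
    cases t with
    | nil => rfl
    | cons c t' =>
      simp only [List.nil_append, List.cons_append, List.cons.injEq] at h
      exact absurd (by simp [← h.1]) ht
  | cons b a' ih =>
    intro t s r ht ha h
    cases t with
    | nil =>
      simp only [List.cons_append, List.nil_append, List.cons.injEq] at h
      exact absurd (by simp [h.1]) ha
    | cons c t' =>
      simp only [List.cons_append, List.cons.injEq] at h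
      have := ih t' s r (fun hx => ht (List.mem_cons_of_mem _ hx))
        (fun hx => ha (List.mem_cons_of_mem _ hx)) h.2
      simp [h.1, this]

theorem pv_prefix_iff (t r a : List Char) (ht : ':' ∉ t) (ha : ':' ∉ a) :
    a ++ [':'] <+: t ++ ':' :: r ↔ t = a := by
  constructor
  · rintro ⟨s, hs⟩
    exact pv_core a t s r ht ha (by simpa using hs)
  · rintro rfl
    exact ⟨r, by simp⟩

theorem pv_eq_colon (t r a : List Char) (ht : ':' ∉ t) (ha : ':' ∉ a) :
    t ++ ':' :: r = a ++ [':'] ↔ t = a ∧ r = [] := by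
  constructor
  · intro h
    have hta : t = a := pv_core a t [] r ht ha (by simpa using h.symm)
    subst hta
    have h2 : (':' :: r : List Char) = [':'] := List.append_cancel_left h
    simp only [List.cons.injEq] at h2
    exact ⟨rfl, h2.2⟩
  · rintro ⟨rfl, rfl⟩; simp

theorem pv_decomp (o : List Char) (ho : o.getLast? = some ':') : o = o.dropLast ++ [':'] := by
  have hne : o ≠ [] := by intro h; simp [h] at ho
  have hcat := List.dropLast_concat_getLast hne
  rw [List.getLast?_eq_some_getLast hne] at ho
  simp only [Option.some.injEq] at ho
  rw [ho] at hcat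
  exact hcat.symm

theorem pv_find_colon (t r : List Char) (ht : ':' ∉ t) :
    PySem.Chars.find (t ++ ':' :: r) [':'] = (t.length : Int) := by
  have hinf : [':'] <:+: t ++ ':' :: r := (List.singleton_infix_iff _ _).mpr (by simp)
  have h0 : 0 ≤ PySem.Chars.find (t ++ ':' :: r) [':'] :=
    (PySem.Chars.find_nonneg_iff _ _).mpr hinf
  obtain ⟨hpre, hmin⟩ := PySem.Chars.find_spec h0
  have hn : (PySem.Chars.find (t ++ ':' :: r) [':']).toNat = t.length := by
    by_contra hne
    rcases Nat.lt_or_ge (PySem.Chars.find (t ++ ':' :: r) [':']).toNat t.length with hlt | hge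
    · rcases hpre with ⟨s, hs⟩
      have hget : ((t ++ ':' :: r).drop (PySem.Chars.find (t ++ ':' :: r) [':']).toNat)[0]? = some ':' := by
        rw [← hs]; rfl
      rw [List.getElem?_drop] at hget
      rw [List.getElem?_append_left (by omega)] at hget
      exact ht (List.mem_of_getElem? (by simpa using hget))
    · have hlt' : t.length < (PySem.Chars.find (t ++ ':' :: r) [':']).toNat := by omega
      exact hmin t.length hlt' ⟨r, by simp⟩
  omega

theorem pv_sw_colon (t r o : List Char) (ht : ':' ∉ t) (ho : o.getLast? = some ':')
    (hfo : ':' ∉ o.dropLast) :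
    PySem.Chars.startswith (t ++ ':' :: r) o = decide (t = o.dropLast) := by
  have hoe := pv_decomp o ho
  by_cases h : t = o.dropLast
  · have hsw : PySem.Chars.startswith (t ++ ':' :: r) o = true := by
      rw [PySem.Chars.startswith_iff, hoe]
      exact (pv_prefix_iff t r o.dropLast ht hfo).mpr h
    rw [hsw]; simp [h]
  · have hsw : PySem.Chars.startswith (t ++ ':' :: r) o = false := by
      rw [← Bool.not_eq_true, PySem.Chars.startswith_iff, hoe]
      exact fun hx => h ((pv_prefix_iff t r o.dropLast ht hfo).mp hx)
    rw [hsw]; simp [h]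

theorem pv_sw_nocolon (l o : List Char) (hl : ':' ∉ l) (ho : ':' ∈ o) :
    PySem.Chars.startswith l o = false := by
  rw [← Bool.not_eq_true]
  intro hx
  exact hl (((PySem.Chars.startswith_iff _ _).mp hx).subset ho)

theorem pv_ne_of_mem_left (l o : List Char) (hl : ':' ∈ l) (ho : ':' ∉ o) : l ≠ o :=
  fun h => ho (h ▸ hl)

theorem pv_ne_of_mem_right (l o : List Char) (hl : ':' ∉ l) (ho : ':' ∈ o) : l ≠ o :=
  fun h => hl (h ▸ ho)

theorem pv_append_colon_eq (t o : List Char) (ho : o.getLast? = some ':') :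
    (t ++ [':'] = o) ↔ t = o.dropLast := by
  conv_lhs => rw [pv_decomp o ho]
  exact List.append_left_inj [':']

-- one step of A's loop on an operator that ends with ':'
theorem pvALoop_colon_cons (t r o : List Char) (ops : List (List Char)) (ht : ':' ∉ t)
    (ho : o.getLast? = some ':') (hfo : ':' ∉ o.dropLast) :
    pvALoop (t ++ ':' :: r) (o :: ops) =
      if t = o.dropLast then (some (String.ofList o), String.ofList r)
      else pvALoop (t ++ ':' :: r) ops := by
  have hoe := pv_decomp o ho
  have hend : PySem.Chars.endswith o [':'] = true := by
    rw [PySem.Chars.endswith_iff]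
    exact ⟨o.dropLast, hoe.symm⟩
  have hsw := pv_sw_colon t r o ht ho hfo
  simp only [pvALoop, hend, hsw, Bool.and_true]
  by_cases h : t = o.dropLast
  · by_cases hr : r = []
    · subst hr
      rw [if_pos (by rw [h]; exact hoe.symm), if_pos h]
    · rw [if_neg (fun hx => hr (((pv_eq_colon t r o.dropLast ht hfo).mp (by rw [← hoe]; exact hx)).2))]
      rw [if_pos (by simp [h]), if_pos h]
      have hlen : (o.length : Int) = ((t.length + 1 : Nat) : Int) := by
        conv_lhs => rw [hoe]
        simp [h]
      rw [hlen, PySem.Chars.slice_eq_listSlice,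
        PySem.List.slice_from (t ++ ':' :: r) (a := ((t.length + 1 : Nat) : Int)) (by omega),
        Int.toNat_natCast, List.drop_length_add_append 1]
      rfl
  · rw [if_neg (fun hx => h (((pv_eq_colon t r o.dropLast ht hfo).mp (by rw [← hoe]; exact hx)).1))]
    rw [if_neg (by simp [h]), if_neg h]

-- one step of A's loop on an operator without ':' when the input has no ':'
theorem pvALoop_nocolon_colon_cons (l o : List Char) (ops : List (List Char))
    (hl : ':' ∉ l) (ho : ':' ∈ o) :
    pvALoop l (o :: ops) = pvALoop l ops := by
  simp only [pvALoop]
  rw [if_neg (pv_ne_of_mem_right l o hl ho), pv_sw_nocolon l o hl ho]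
  simp

-- one step of A's loop on a no-value operator
theorem pvALoop_bare_cons (l o : List Char) (ops : List (List Char))
    (he : PySem.Chars.endswith o [':'] = false) :
    pvALoop l (o :: ops) = if l = o then (some (String.ofList o), "") else pvALoop l ops := by
  simp [pvALoop, he]


set_option maxHeartbeats 2000000 in
theorem pv_main (expr : String) : parse_condition_expr_py expr = parse_condition_expr_py_alt expr := by
  unfold parse_condition_expr_py parse_condition_expr_py_alt
  generalize expr.toList = l
  by_cases hnil : l = []
  · subst hnil; rfl
  rw [if_neg hnil, if_neg hnil]
  by_cases hc : ':' ∈ l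
  · obtain ⟨t, r, rfl, ht⟩ := pv_split l hc
    -- reduce B's side: the first colon is at index t.length
    have hpre : PySem.Chars.slice (t ++ ':' :: r) none (some ((t.length : Int) + 1)) = t ++ [':'] := by
      rw [PySem.Chars.slice_eq_listSlice, PySem.List.slice_to (t ++ ':' :: r) (b := (t.length : Int) + 1) (by omega)]
      have h1 : ((t.length : Int) + 1).toNat = t.length + 1 := by omega
      rw [h1, List.take_length_add_append 1]
      rfl
    have hdrop : PySem.Chars.slice (t ++ ':' :: r) (some ((t.length : Int) + 1)) none = r := by
      rw [PySem.Chars.slice_eq_listSlice, PySem.List.slice_from (t ++ ':' :: r) (a := (t.length : Int) + 1) (by omega)]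
      have h1 : ((t.length : Int) + 1).toNat = t.length + 1 := by omega
      rw [h1, List.drop_length_add_append 1]
      rfl
    rw [pv_find_colon t r ht, if_pos (Int.natCast_nonneg t.length), hpre, hdrop]
    rw [pv_sw_colon t r "json:".toList ht (by decide) (by decide),
        pv_sw_colon t r "llm:".toList ht (by decide) (by decide)]
    simp only [decide_eq_true_eq, pvAOps]
    rw [pvALoop_colon_cons t r "not_contains:".toList _ ht (by decide) (by decide)]
    rw [pvALoop_colon_cons t r "contains:".toList _ ht (by decide) (by decide)]
    rw [pvALoop_bare_cons (t ++ ':' :: r) "not_empty".toList _ (by decide),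
        if_neg (pv_ne_of_mem_left (t ++ ':' :: r) "not_empty".toList (by simp) (by decide))]
    rw [pvALoop_bare_cons (t ++ ':' :: r) "empty".toList _ (by decide),
        if_neg (pv_ne_of_mem_left (t ++ ':' :: r) "empty".toList (by simp) (by decide))]
    rw [pvALoop_colon_cons t r "equals:".toList _ ht (by decide) (by decide)]
    rw [pvALoop_colon_cons t r "matches:".toList _ ht (by decide) (by decide)]
    rw [pvALoop_colon_cons t r "length_gt:".toList _ ht (by decide) (by decide)]
    rw [pvALoop_colon_cons t r "length_lt:".toList _ ht (by decide) (by decide)]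
    rw [pvALoop_colon_cons t r "gte:".toList _ ht (by decide) (by decide)]
    rw [pvALoop_colon_cons t r "lte:".toList _ ht (by decide) (by decide)]
    rw [pvALoop_colon_cons t r "gt:".toList _ ht (by decide) (by decide)]
    rw [pvALoop_colon_cons t r "lt:".toList _ ht (by decide) (by decide)]
    rw [pvALoop_bare_cons (t ++ ':' :: r) "true".toList _ (by decide),
        if_neg (pv_ne_of_mem_left (t ++ ':' :: r) "true".toList (by simp) (by decide))]
    rw [pvALoop_bare_cons (t ++ ':' :: r) "false".toList _ (by decide),
        if_neg (pv_ne_of_mem_left (t ++ ':' :: r) "false".toList (by simp) (by decide))]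
    simp only [pvALoop]
    by_cases h1 : t = "json:".toList.dropLast
    · subst h1
      have hv : PySem.Chars.slice ("json:".toList.dropLast ++ ':' :: r) (some (("json:".toList.length : Int))) none = r := by
        rw [PySem.Chars.slice_eq_listSlice,
          PySem.List.slice_from ("json:".toList.dropLast ++ ':' :: r) (a := (("json:".toList.length : Int))) (by decide),
          Int.toNat_natCast]
        rfl
      rw [hv]
      rfl
    by_cases h2 : t = "llm:".toList.dropLast
    · subst h2
      have hv : PySem.Chars.slice ("llm:".toList.dropLast ++ ':' :: r) (some (("llm:".toList.length : Int))) none = r := by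
        rw [PySem.Chars.slice_eq_listSlice,
          PySem.List.slice_from ("llm:".toList.dropLast ++ ':' :: r) (a := (("llm:".toList.length : Int))) (by decide),
          Int.toNat_natCast]
        rfl
      rw [hv]
      rfl
    by_cases h3 : t = "not_contains:".toList.dropLast
    · subst h3
      rfl
    by_cases h4 : t = "contains:".toList.dropLast
    · subst h4
      rfl
    by_cases h5 : t = "equals:".toList.dropLast
    · subst h5
      rfl
    by_cases h6 : t = "matches:".toList.dropLast
    · subst h6
      rfl
    by_cases h7 : t = "length_gt:".toList.dropLast
    · subst h7
      rfl
    by_cases h8 : t = "length_lt:".toList.dropLast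
    · subst h8
      rfl
    by_cases h9 : t = "gte:".toList.dropLast
    · subst h9
      rfl
    by_cases h10 : t = "lte:".toList.dropLast
    · subst h10
      rfl
    by_cases h11 : t = "gt:".toList.dropLast
    · subst h11
      rfl
    by_cases h12 : t = "lt:".toList.dropLast
    · subst h12
      rfl
    -- no colon operator matches the prefix: both return (none, "")
    rw [if_neg h1, if_neg h2, if_neg h3, if_neg h4, if_neg h5, if_neg h6, if_neg h7, if_neg h8, if_neg h9, if_neg h10, if_neg h11, if_neg h12]
    have hcf : ¬ pvColonOps.contains (t ++ [':']) = true := by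
      intro hx
      rw [List.contains_iff_mem] at hx
      simp only [pvColonOps, List.mem_cons, List.not_mem_nil, or_false] at hx
      rcases hx with hx | hx | hx | hx | hx | hx | hx | hx | hx | hx | hx | hx
      all_goals first
        | exact h1 ((pv_append_colon_eq t "json:".toList (by decide)).mp hx)
        | exact h2 ((pv_append_colon_eq t "llm:".toList (by decide)).mp hx)
        | exact h3 ((pv_append_colon_eq t "not_contains:".toList (by decide)).mp hx)
        | exact h4 ((pv_append_colon_eq t "contains:".toList (by decide)).mp hx)
        | exact h5 ((pv_append_colon_eq t "equals:".toList (by decide)).mp hx)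
        | exact h6 ((pv_append_colon_eq t "matches:".toList (by decide)).mp hx)
        | exact h7 ((pv_append_colon_eq t "length_gt:".toList (by decide)).mp hx)
        | exact h8 ((pv_append_colon_eq t "length_lt:".toList (by decide)).mp hx)
        | exact h9 ((pv_append_colon_eq t "gte:".toList (by decide)).mp hx)
        | exact h10 ((pv_append_colon_eq t "lte:".toList (by decide)).mp hx)
        | exact h11 ((pv_append_colon_eq t "gt:".toList (by decide)).mp hx)
        | exact h12 ((pv_append_colon_eq t "lt:".toList (by decide)).mp hx)
    rw [if_neg hcf]
  · -- the input contains no colon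
    rw [pv_sw_nocolon l "json:".toList hc (by decide), pv_sw_nocolon l "llm:".toList hc (by decide)]
    rw [if_neg (by simp), if_neg (by simp)]
    simp only [pvAOps]
    rw [pvALoop_nocolon_colon_cons l "not_contains:".toList _ hc (by decide)]
    rw [pvALoop_nocolon_colon_cons l "contains:".toList _ hc (by decide)]
    rw [pvALoop_bare_cons l "not_empty".toList _ (by decide)]
    rw [pvALoop_bare_cons l "empty".toList _ (by decide)]
    rw [pvALoop_nocolon_colon_cons l "equals:".toList _ hc (by decide)]
    rw [pvALoop_nocolon_colon_cons l "matches:".toList _ hc (by decide)]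
    rw [pvALoop_nocolon_colon_cons l "length_gt:".toList _ hc (by decide)]
    rw [pvALoop_nocolon_colon_cons l "length_lt:".toList _ hc (by decide)]
    rw [pvALoop_nocolon_colon_cons l "gte:".toList _ hc (by decide)]
    rw [pvALoop_nocolon_colon_cons l "lte:".toList _ hc (by decide)]
    rw [pvALoop_nocolon_colon_cons l "gt:".toList _ hc (by decide)]
    rw [pvALoop_nocolon_colon_cons l "lt:".toList _ hc (by decide)]
    rw [pvALoop_bare_cons l "true".toList _ (by decide)]
    rw [pvALoop_bare_cons l "false".toList _ (by decide)]
    simp only [pvALoop]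
    have hf : PySem.Chars.find l [':'] = -1 :=
      (PySem.Chars.find_eq_neg_one_iff _ _).mpr (by rw [List.singleton_infix_iff]; exact hc)
    rw [hf, if_neg (show ¬((0:Int) ≤ -1) by decide)]
    by_cases b1 : l = "not_empty".toList
    · subst b1; decide
    by_cases b2 : l = "empty".toList
    · subst b2; decide
    by_cases b3 : l = "true".toList
    · subst b3; decide
    by_cases b4 : l = "false".toList
    · subst b4; decide
    rw [if_neg b1, if_neg b2, if_neg b3, if_neg b4]
    have hbf : ¬ pvBareOps.contains l = true := by
      intro hx
      rw [List.contains_iff_mem] at hx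
      simp only [pvBareOps, List.mem_cons, List.not_mem_nil, or_false] at hx
      rcases hx with hx | hx | hx | hx
      exacts [b1 hx, b2 hx, b3 hx, b4 hx]
    rw [if_neg hbf]

-- ===== VERDICT (by name: the statement is the Claim_ definition above) =====
theorem parse_condition_expr_py_spec : Claim_equal_parse_condition_expr_py := by
  intro expr _
  unfold Spec_parse_condition_expr_py
  exact pv_main expr
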